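-- pv_equiv track=rewrite | github.com/petteriTeikari/deep-biblio-tools | tests/test_bibliography_integrity.py | analyze_citation_patterns
-- ===== SOURCE A (Python) =====
-- def analyze_citation_patterns(tex_content: str) -> dict[str, int]:
--     """Analyze which citation commands are used and how frequently."""
--     pattern_counts = {
--         "\\cite": 0,
--         "\\citep": 0,
--         "\\citet": 0,
--         "\\citeauthor": 0,
--         "\\citeyear": 0,
--         "\\nocite": 0,
--     }
--
--     # Count citation commands using string methods
--     i = 0
--     while i < len(tex_content):
--         # Check for \nocite first (longer pattern)
--         if tex_content[i : i + 7] == "\\nocite":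
--             pattern_counts["\\nocite"] += 1
--             i += 7
--             continue
--         elif tex_content[i : i + 5] == "\\cite":
--             # Determine which cite command it is
--             j = i + 5
--             command = "\\cite"
--
--             # Check for extensions (p, t, author, year)
--             if j < len(tex_content):
--                 if tex_content[j : j + 6] == "author":
--                     command = "\\citeauthor"
--                     j += 6
--                 elif tex_content[j : j + 4] == "year":
--                     command = "\\citeyear"
--                     j += 4
--                 elif tex_content[j] == "p":
--                     command = "\\citep"
--                     j += 1
--                 elif tex_content[j] == "t":
--                     command = "\\citet"
--                     j += 1
--
--             if command in pattern_counts: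
--                 pattern_counts[command] += 1
--
--             i = j
--             continue
--
--         i += 1
--
--     return pattern_counts
-- ===== SOURCE B (Python) =====
-- def analyze_citation_patterns(tex_content: str) -> dict[str, int]:
--     """Closed-form recount: six non-overlapping substring counts instead of a
--     character-by-character state-machine scan; plain \\cite = total minus suffixed."""
--     total = tex_content.count("\\cite")
--     author = tex_content.count("\\citeauthor")
--     year = tex_content.count("\\citeyear")
--     p = tex_content.count("\\citep")
--     t = tex_content.count("\\citet")
--     return {
--         "\\cite": total - author - year - p - t,
--         "\\citep": p,
--         "\\citet": t,
--         "\\citeauthor": author,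
--         "\\citeyear": year,
--         "\\nocite": tex_content.count("\\nocite"),
--     }
-- ===== Notes on version B (the rewrite author's own statement) =====
-- stated objective: simpler
-- what changed: Replaces the character-by-character state-machine scan (explicit index, prefix branches, manual advance) by six closed-form non-overlapping substring counts via str.count, with plain \cite obtained as total \cite occurrences minus the suffixed variants.
import Mathlib
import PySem

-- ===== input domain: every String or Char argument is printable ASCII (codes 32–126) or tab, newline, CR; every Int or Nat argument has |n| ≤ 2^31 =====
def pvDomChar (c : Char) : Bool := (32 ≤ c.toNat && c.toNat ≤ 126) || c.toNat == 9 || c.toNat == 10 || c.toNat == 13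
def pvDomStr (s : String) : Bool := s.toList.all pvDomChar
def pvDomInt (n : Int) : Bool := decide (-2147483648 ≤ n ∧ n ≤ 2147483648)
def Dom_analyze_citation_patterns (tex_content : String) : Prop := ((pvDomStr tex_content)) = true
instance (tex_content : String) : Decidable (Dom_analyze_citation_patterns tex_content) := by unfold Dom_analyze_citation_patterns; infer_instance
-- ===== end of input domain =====

-- B replaces A's character-by-character state-machine scan by six closed-form
-- non-overlapping substring counts (str.count), plain \cite = total minus suffixed variants.

-- ===== PORT A =====
-- A's while loop over index i, transcribed as structural recursion on the remaining
-- characters; the state is the six counters in A's dict insertion order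
-- (\cite, \citep, \citet, \citeauthor, \citeyear, \nocite).
def loopA : List Char → Int × Int × Int × Int × Int × Int → Int × Int × Int × Int × Int × Int
  | [], s => s
  | ch :: tl, (c, p, t, a, y, n) =>
    -- tex_content[i:i+7] == "\nocite"
    if (ch :: tl).take 7 = "\\nocite".toList then
      loopA ((ch :: tl).drop 7) (c, p, t, a, y, n + 1)
    -- tex_content[i:i+5] == "\cite"
    else if (ch :: tl).take 5 = "\\cite".toList then
      -- the j < len(tex_content) guard is implicit: each check below fails on the empty rest
      if ((ch :: tl).drop 5).take 6 = "author".toList then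
        loopA (((ch :: tl).drop 5).drop 6) (c, p, t, a + 1, y, n)
      else if ((ch :: tl).drop 5).take 4 = "year".toList then
        loopA (((ch :: tl).drop 5).drop 4) (c, p, t, a, y + 1, n)
      else if PySem.List.pyGet? ((ch :: tl).drop 5) 0 = some 'p' then
        loopA (((ch :: tl).drop 5).drop 1) (c, p + 1, t, a, y, n)
      else if PySem.List.pyGet? ((ch :: tl).drop 5) 0 = some 't' then
        loopA (((ch :: tl).drop 5).drop 1) (c, p, t + 1, a, y, n)
      else
        loopA ((ch :: tl).drop 5) (c + 1, p, t, a, y, n)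
    else
      loopA tl (c, p, t, a, y, n)
  termination_by cs _ => cs.length
  decreasing_by all_goals (simp only [List.length_drop, List.length_cons]; omega)

def analyze_citation_patterns (tex_content : String) : List (String × Int) :=
  let s := loopA tex_content.toList (0, 0, 0, 0, 0, 0)
  [("\\cite", s.1), ("\\citep", s.2.1), ("\\citet", s.2.2.1),
   ("\\citeauthor", s.2.2.2.1), ("\\citeyear", s.2.2.2.2.1), ("\\nocite", s.2.2.2.2.2)]

-- ===== PORT B =====
def analyze_citation_patterns_alt (tex_content : String) : List (String × Int) :=
  let total : Int := PySem.Str.count tex_content "\\cite"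
  let author : Int := PySem.Str.count tex_content "\\citeauthor"
  let year : Int := PySem.Str.count tex_content "\\citeyear"
  let p : Int := PySem.Str.count tex_content "\\citep"
  let t : Int := PySem.Str.count tex_content "\\citet"
  [("\\cite", total - author - year - p - t), ("\\citep", p), ("\\citet", t),
   ("\\citeauthor", author), ("\\citeyear", year),
   ("\\nocite", (PySem.Str.count tex_content "\\nocite" : Int))]

-- ===== PRECONDITION & SPEC =====
def Spec_analyze_citation_patterns (tex_content : String) (out : List (String × Int)) : Prop := out = analyze_citation_patterns_alt tex_content
instance (tex_content : String) (out : List (String × Int)) : Decidable (Spec_analyze_citation_patterns tex_content out) := by unfold Spec_analyze_citation_patterns; infer_instance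

-- ===== CLAIM (what is proved, stated in full; the proofs are below) =====
def Claim_equal_analyze_citation_patterns : Prop := ∀ (tex_content : String), Dom_analyze_citation_patterns tex_content → Spec_analyze_citation_patterns tex_content (analyze_citation_patterns tex_content)

-- ===== LEMMAS AND PROOFS =====

-- Greedy left-to-right non-overlapping occurrence count (the specification shared
-- by A's scan and Python's str.count).
def cnt (sub : List Char) : List Char → Nat
  | [] => 0
  | ch :: tl => if sub.isPrefixOf (ch :: tl) then cnt sub (tl.drop (sub.length - 1)) + 1 else cnt sub tl
  termination_by cs => cs.length
  decreasing_by all_goals (simp only [List.length_drop, List.length_cons]; omega)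

lemma cnt_nil (sub : List Char) : cnt sub [] = 0 := by simp [cnt]

lemma cnt_step_not {sub cs : List Char} (h : ¬ sub <+: cs) : cnt sub cs = cnt sub (cs.drop 1) := by
  cases cs with
  | nil => simp
  | cons ch tl => rw [cnt]; rw [if_neg (by simpa [List.isPrefixOf_iff_prefix] using h)]; simp

lemma cnt_step_yes {sub cs : List Char} (hne : sub ≠ []) (h : sub <+: cs) :
    cnt sub cs = cnt sub (cs.drop sub.length) + 1 := by
  cases cs with
  | nil => cases sub with | nil => exact absurd rfl hne | cons a u => simp at h
  | cons ch tl =>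
      rw [cnt, if_pos (by simpa [List.isPrefixOf_iff_prefix] using h)]
      congr 1
      cases sub with
      | nil => exact absurd rfl hne
      | cons a u => simp

lemma cnt_skip_nobs {sub : List Char} (hh : sub.head? = some '\\') :
    ∀ (pre r : List Char), (∀ c ∈ pre, c ≠ '\\') → cnt sub (pre ++ r) = cnt sub r := by
  intro pre
  induction pre with
  | nil => intro r _; simp
  | cons c mid ih =>
      intro r hc
      rw [cnt_step_not]
      · simpa using ih r (fun d hd => hc d (List.mem_cons_of_mem _ hd))
      · intro hpre
        cases sub with
        | nil => simp at hh
        | cons a u =>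
            rw [List.cons_append, List.cons_prefix_cons] at hpre
            simp at hh
            exact hc c (by simp) (hpre.1 ▸ hh.symm ▸ rfl)

-- a non-matching chunk b :: mid (mid backslash-free) contains no occurrence of sub
lemma cnt_chunk {sub : List Char} (hh : sub.head? = some '\\') (b : Char) (mid r : List Char)
    (h0 : ¬ sub <+: (b :: mid) ++ r) (hmid : ∀ c ∈ mid, c ≠ '\\') :
    cnt sub ((b :: mid) ++ r) = cnt sub r := by
  rw [cnt_step_not h0]; simpa using cnt_skip_nobs hh mid r hmid

lemma count_go_eq (sub : List Char) (hne : sub ≠ []) :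
    ∀ (fuel : Nat) (l : List Char) (acc : Nat), l.length ≤ fuel →
      PySem.Chars.count.go sub fuel l acc = acc + cnt sub l := by
  intro fuel
  induction fuel with
  | zero =>
      intro l acc hl
      have : l = [] := List.eq_nil_of_length_eq_zero (Nat.le_zero.mp hl)
      subst this; rw [PySem.Chars.count.go]; simp [cnt_nil]
  | succ fuel ih =>
      intro l acc hl
      cases l with
      | nil => rw [PySem.Chars.count.go]; simp [cnt_nil]; omega
      | cons h t =>
          have hs : 0 < sub.length := List.length_pos_of_ne_nil hne
          rw [PySem.Chars.count.go]
          by_cases hp : sub.isPrefixOf (h :: t)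
          · rw [if_pos hp]
            have hpre : sub <+: (h :: t) := List.isPrefixOf_iff_prefix.mp hp
            rw [ih _ _ (by simp at hl ⊢; omega)]
            rw [cnt_step_yes hne hpre]
            omega
          · rw [if_neg hp]
            rw [ih _ _ (by simp at hl; omega)]
            have := cnt_step_not (sub := sub) (cs := h :: t)
              (by simpa [List.isPrefixOf_iff_prefix] using hp)
            simp at this
            rw [this]

lemma count_eq_cnt (s sub : List Char) (hne : sub ≠ []) :
    PySem.Chars.count s sub = cnt sub s := by
  rw [PySem.Chars.count, if_neg (by simpa [List.isEmpty_iff] using hne)]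
  simpa using count_go_eq sub hne s.length s 0 le_rfl

lemma pyGet_zero (l : List Char) : PySem.List.pyGet? l 0 = l.head? := by
  have h := PySem.List.pyGet?_natCast l 0
  simp at h
  rw [h]
  cases l <;> simp

lemma single_prefix (a : Char) (l : List Char) : [a] <+: l ↔ l.head? = some a := by
  cases l <;> simp [List.cons_prefix_cons, eq_comm]

-- the six counters A maintains are exactly the six greedy substring counts
lemma master (cs : List Char) (s : Int × Int × Int × Int × Int × Int) :
    loopA cs s =
      (s.1 + (cnt ['\\','c','i','t','e'] cs : Int) - (cnt ['\\','c','i','t','e','a','u','t','h','o','r'] cs : Int)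
         - (cnt ['\\','c','i','t','e','y','e','a','r'] cs : Int) - (cnt ['\\','c','i','t','e','p'] cs : Int)
         - (cnt ['\\','c','i','t','e','t'] cs : Int),
       s.2.1 + (cnt ['\\','c','i','t','e','p'] cs : Int),
       s.2.2.1 + (cnt ['\\','c','i','t','e','t'] cs : Int),
       s.2.2.2.1 + (cnt ['\\','c','i','t','e','a','u','t','h','o','r'] cs : Int),
       s.2.2.2.2.1 + (cnt ['\\','c','i','t','e','y','e','a','r'] cs : Int),
       s.2.2.2.2.2 + (cnt ['\\','n','o','c','i','t','e'] cs : Int)) := by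
  induction cs, s using loopA.induct with
  | case1 s =>
      obtain ⟨c, p, t, a, y, n⟩ := s
      rw [loopA]
      simp [cnt_nil]
  | case2 ch tl c p t a y n h7 ih =>
      have hcs : ch :: tl = ['\\','n','o','c','i','t','e'] ++ (ch :: tl).drop 7 := by
        conv_lhs => rw [← List.take_append_drop 7 (ch :: tl)]
        rw [h7]
        rfl
      rw [loopA, if_pos h7, ih]
      set r := (ch :: tl).drop 7 with hr
      rw [hcs]
      have h1 : cnt ['\\','n','o','c','i','t','e'] (['\\','n','o','c','i','t','e'] ++ r)
          = cnt ['\\','n','o','c','i','t','e'] r + 1 := by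
        rw [cnt_step_yes (by simp) (List.prefix_append _ _), List.drop_left]
      have h2 : cnt ['\\','c','i','t','e'] (['\\','n','o','c','i','t','e'] ++ r) = cnt ['\\','c','i','t','e'] r :=
        cnt_chunk rfl '\\' ['n','o','c','i','t','e'] r (by simp [List.cons_prefix_cons]) (by simp)
      have h3 : cnt ['\\','c','i','t','e','a','u','t','h','o','r'] (['\\','n','o','c','i','t','e'] ++ r)
          = cnt ['\\','c','i','t','e','a','u','t','h','o','r'] r :=
        cnt_chunk rfl '\\' ['n','o','c','i','t','e'] r (by simp [List.cons_prefix_cons]) (by simp)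
      have h4 : cnt ['\\','c','i','t','e','y','e','a','r'] (['\\','n','o','c','i','t','e'] ++ r)
          = cnt ['\\','c','i','t','e','y','e','a','r'] r :=
        cnt_chunk rfl '\\' ['n','o','c','i','t','e'] r (by simp [List.cons_prefix_cons]) (by simp)
      have h5 : cnt ['\\','c','i','t','e','p'] (['\\','n','o','c','i','t','e'] ++ r) = cnt ['\\','c','i','t','e','p'] r :=
        cnt_chunk rfl '\\' ['n','o','c','i','t','e'] r (by simp [List.cons_prefix_cons]) (by simp)
      have h6 : cnt ['\\','c','i','t','e','t'] (['\\','n','o','c','i','t','e'] ++ r) = cnt ['\\','c','i','t','e','t'] r :=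
        cnt_chunk rfl '\\' ['n','o','c','i','t','e'] r (by simp [List.cons_prefix_cons]) (by simp)
      rw [h1, h2, h3, h4, h5, h6]
      dsimp only
      simp only [Prod.mk.injEq]
      and_intros <;> push_cast <;> try ring
  | case3 ch tl c p t a y n h7n h5 ha ih =>
      have hcs : ch :: tl = ['\\','c','i','t','e','a','u','t','h','o','r'] ++ ((ch :: tl).drop 5).drop 6 := by
        conv_lhs => rw [← List.take_append_drop 5 (ch :: tl), ← List.take_append_drop 6 ((ch :: tl).drop 5)]
        rw [h5, ha]
        rfl
      rw [loopA, if_neg h7n, if_pos h5, if_pos ha, ih]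
      set r := ((ch :: tl).drop 5).drop 6 with hr
      rw [hcs]
      have h1 : cnt ['\\','c','i','t','e','a','u','t','h','o','r'] (['\\','c','i','t','e','a','u','t','h','o','r'] ++ r)
          = cnt ['\\','c','i','t','e','a','u','t','h','o','r'] r + 1 := by
        rw [cnt_step_yes (by simp) (List.prefix_append _ _), List.drop_left]
      have h2 : cnt ['\\','c','i','t','e'] (['\\','c','i','t','e','a','u','t','h','o','r'] ++ r)
          = cnt ['\\','c','i','t','e'] r + 1 := by
        have hassoc : (['\\','c','i','t','e','a','u','t','h','o','r'] : List Char) ++ r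
            = ['\\','c','i','t','e'] ++ (['a','u','t','h','o','r'] ++ r) := by simp
        rw [hassoc, cnt_step_yes (by simp) (List.prefix_append _ _), List.drop_left,
          cnt_skip_nobs rfl ['a','u','t','h','o','r'] r (by simp)]
      have h3 : cnt ['\\','c','i','t','e','y','e','a','r'] (['\\','c','i','t','e','a','u','t','h','o','r'] ++ r)
          = cnt ['\\','c','i','t','e','y','e','a','r'] r :=
        cnt_chunk rfl '\\' ['c','i','t','e','a','u','t','h','o','r'] r (by simp [List.cons_prefix_cons]) (by simp)
      have h4 : cnt ['\\','c','i','t','e','p'] (['\\','c','i','t','e','a','u','t','h','o','r'] ++ r)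
          = cnt ['\\','c','i','t','e','p'] r :=
        cnt_chunk rfl '\\' ['c','i','t','e','a','u','t','h','o','r'] r (by simp [List.cons_prefix_cons]) (by simp)
      have h5' : cnt ['\\','c','i','t','e','t'] (['\\','c','i','t','e','a','u','t','h','o','r'] ++ r)
          = cnt ['\\','c','i','t','e','t'] r :=
        cnt_chunk rfl '\\' ['c','i','t','e','a','u','t','h','o','r'] r (by simp [List.cons_prefix_cons]) (by simp)
      have h6 : cnt ['\\','n','o','c','i','t','e'] (['\\','c','i','t','e','a','u','t','h','o','r'] ++ r)
          = cnt ['\\','n','o','c','i','t','e'] r :=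
        cnt_chunk rfl '\\' ['c','i','t','e','a','u','t','h','o','r'] r (by simp [List.cons_prefix_cons]) (by simp)
      rw [h1, h2, h3, h4, h5', h6]
      dsimp only
      simp only [Prod.mk.injEq]
      and_intros <;> push_cast <;> try ring
  | case4 ch tl c p t a y n h7n h5 hna hy ih =>
      have hcs : ch :: tl = ['\\','c','i','t','e','y','e','a','r'] ++ ((ch :: tl).drop 5).drop 4 := by
        conv_lhs => rw [← List.take_append_drop 5 (ch :: tl), ← List.take_append_drop 4 ((ch :: tl).drop 5)]
        rw [h5, hy]
        rfl
      rw [loopA, if_neg h7n, if_pos h5, if_neg hna, if_pos hy, ih]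
      set r := ((ch :: tl).drop 5).drop 4 with hr
      rw [hcs]
      have h1 : cnt ['\\','c','i','t','e','y','e','a','r'] (['\\','c','i','t','e','y','e','a','r'] ++ r)
          = cnt ['\\','c','i','t','e','y','e','a','r'] r + 1 := by
        rw [cnt_step_yes (by simp) (List.prefix_append _ _), List.drop_left]
      have h2 : cnt ['\\','c','i','t','e'] (['\\','c','i','t','e','y','e','a','r'] ++ r)
          = cnt ['\\','c','i','t','e'] r + 1 := by
        have hassoc : (['\\','c','i','t','e','y','e','a','r'] : List Char) ++ r
            = ['\\','c','i','t','e'] ++ (['y','e','a','r'] ++ r) := by simp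
        rw [hassoc, cnt_step_yes (by simp) (List.prefix_append _ _), List.drop_left,
          cnt_skip_nobs rfl ['y','e','a','r'] r (by simp)]
      have h3 : cnt ['\\','c','i','t','e','a','u','t','h','o','r'] (['\\','c','i','t','e','y','e','a','r'] ++ r)
          = cnt ['\\','c','i','t','e','a','u','t','h','o','r'] r :=
        cnt_chunk rfl '\\' ['c','i','t','e','y','e','a','r'] r (by simp [List.cons_prefix_cons]) (by simp)
      have h4 : cnt ['\\','c','i','t','e','p'] (['\\','c','i','t','e','y','e','a','r'] ++ r)
          = cnt ['\\','c','i','t','e','p'] r :=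
        cnt_chunk rfl '\\' ['c','i','t','e','y','e','a','r'] r (by simp [List.cons_prefix_cons]) (by simp)
      have h5' : cnt ['\\','c','i','t','e','t'] (['\\','c','i','t','e','y','e','a','r'] ++ r)
          = cnt ['\\','c','i','t','e','t'] r :=
        cnt_chunk rfl '\\' ['c','i','t','e','y','e','a','r'] r (by simp [List.cons_prefix_cons]) (by simp)
      have h6 : cnt ['\\','n','o','c','i','t','e'] (['\\','c','i','t','e','y','e','a','r'] ++ r)
          = cnt ['\\','n','o','c','i','t','e'] r :=
        cnt_chunk rfl '\\' ['c','i','t','e','y','e','a','r'] r (by simp [List.cons_prefix_cons]) (by simp)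
      rw [h1, h2, h3, h4, h5', h6]
      dsimp only
      simp only [Prod.mk.injEq]
      and_intros <;> push_cast <;> try ring
  | case5 ch tl c p t a y n h7n h5 hna hny hp ih =>
      have hrest : (ch :: tl).drop 5 = 'p' :: ((ch :: tl).drop 5).drop 1 := by
        rw [pyGet_zero] at hp
        cases h' : (ch :: tl).drop 5 with
        | nil => rw [h'] at hp; simp at hp
        | cons b rt => rw [h'] at hp; simp at hp; rw [hp]; simp
      have hcs : ch :: tl = ['\\','c','i','t','e','p'] ++ ((ch :: tl).drop 5).drop 1 := by
        conv_lhs => rw [← List.take_append_drop 5 (ch :: tl)]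
        rw [h5]
        conv_lhs => rw [hrest]
        rfl
      rw [loopA, if_neg h7n, if_pos h5, if_neg hna, if_neg hny, if_pos hp, ih]
      set r := ((ch :: tl).drop 5).drop 1 with hr
      rw [hcs]
      have h1 : cnt ['\\','c','i','t','e','p'] (['\\','c','i','t','e','p'] ++ r)
          = cnt ['\\','c','i','t','e','p'] r + 1 := by
        rw [cnt_step_yes (by simp) (List.prefix_append _ _), List.drop_left]
      have h2 : cnt ['\\','c','i','t','e'] (['\\','c','i','t','e','p'] ++ r)
          = cnt ['\\','c','i','t','e'] r + 1 := by
        have hassoc : (['\\','c','i','t','e','p'] : List Char) ++ r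
            = ['\\','c','i','t','e'] ++ (['p'] ++ r) := by simp
        rw [hassoc, cnt_step_yes (by simp) (List.prefix_append _ _), List.drop_left,
          cnt_skip_nobs rfl ['p'] r (by simp)]
      have h3 : cnt ['\\','c','i','t','e','a','u','t','h','o','r'] (['\\','c','i','t','e','p'] ++ r)
          = cnt ['\\','c','i','t','e','a','u','t','h','o','r'] r :=
        cnt_chunk rfl '\\' ['c','i','t','e','p'] r (by simp [List.cons_prefix_cons]) (by simp)
      have h4 : cnt ['\\','c','i','t','e','y','e','a','r'] (['\\','c','i','t','e','p'] ++ r)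
          = cnt ['\\','c','i','t','e','y','e','a','r'] r :=
        cnt_chunk rfl '\\' ['c','i','t','e','p'] r (by simp [List.cons_prefix_cons]) (by simp)
      have h5' : cnt ['\\','c','i','t','e','t'] (['\\','c','i','t','e','p'] ++ r)
          = cnt ['\\','c','i','t','e','t'] r :=
        cnt_chunk rfl '\\' ['c','i','t','e','p'] r (by simp [List.cons_prefix_cons]) (by simp)
      have h6 : cnt ['\\','n','o','c','i','t','e'] (['\\','c','i','t','e','p'] ++ r)
          = cnt ['\\','n','o','c','i','t','e'] r :=
        cnt_chunk rfl '\\' ['c','i','t','e','p'] r (by simp [List.cons_prefix_cons]) (by simp)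
      rw [h1, h2, h3, h4, h5', h6]
      dsimp only
      simp only [Prod.mk.injEq]
      and_intros <;> push_cast <;> try ring
  | case6 ch tl c p t a y n h7n h5 hna hny hnp ht ih =>
      have hrest : (ch :: tl).drop 5 = 't' :: ((ch :: tl).drop 5).drop 1 := by
        rw [pyGet_zero] at ht
        cases h' : (ch :: tl).drop 5 with
        | nil => rw [h'] at ht; simp at ht
        | cons b rt => rw [h'] at ht; simp at ht; rw [ht]; simp
      have hcs : ch :: tl = ['\\','c','i','t','e','t'] ++ ((ch :: tl).drop 5).drop 1 := by
        conv_lhs => rw [← List.take_append_drop 5 (ch :: tl)]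
        rw [h5]
        conv_lhs => rw [hrest]
        rfl
      rw [loopA, if_neg h7n, if_pos h5, if_neg hna, if_neg hny, if_neg hnp, if_pos ht, ih]
      set r := ((ch :: tl).drop 5).drop 1 with hr
      rw [hcs]
      have h1 : cnt ['\\','c','i','t','e','t'] (['\\','c','i','t','e','t'] ++ r)
          = cnt ['\\','c','i','t','e','t'] r + 1 := by
        rw [cnt_step_yes (by simp) (List.prefix_append _ _), List.drop_left]
      have h2 : cnt ['\\','c','i','t','e'] (['\\','c','i','t','e','t'] ++ r)
          = cnt ['\\','c','i','t','e'] r + 1 := by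
        have hassoc : (['\\','c','i','t','e','t'] : List Char) ++ r
            = ['\\','c','i','t','e'] ++ (['t'] ++ r) := by simp
        rw [hassoc, cnt_step_yes (by simp) (List.prefix_append _ _), List.drop_left,
          cnt_skip_nobs rfl ['t'] r (by simp)]
      have h3 : cnt ['\\','c','i','t','e','a','u','t','h','o','r'] (['\\','c','i','t','e','t'] ++ r)
          = cnt ['\\','c','i','t','e','a','u','t','h','o','r'] r :=
        cnt_chunk rfl '\\' ['c','i','t','e','t'] r (by simp [List.cons_prefix_cons]) (by simp)
      have h4 : cnt ['\\','c','i','t','e','y','e','a','r'] (['\\','c','i','t','e','t'] ++ r)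
          = cnt ['\\','c','i','t','e','y','e','a','r'] r :=
        cnt_chunk rfl '\\' ['c','i','t','e','t'] r (by simp [List.cons_prefix_cons]) (by simp)
      have h5' : cnt ['\\','c','i','t','e','p'] (['\\','c','i','t','e','t'] ++ r)
          = cnt ['\\','c','i','t','e','p'] r :=
        cnt_chunk rfl '\\' ['c','i','t','e','t'] r (by simp [List.cons_prefix_cons]) (by simp)
      have h6 : cnt ['\\','n','o','c','i','t','e'] (['\\','c','i','t','e','t'] ++ r)
          = cnt ['\\','n','o','c','i','t','e'] r :=
        cnt_chunk rfl '\\' ['c','i','t','e','t'] r (by simp [List.cons_prefix_cons]) (by simp)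
      rw [h1, h2, h3, h4, h5', h6]
      dsimp only
      simp only [Prod.mk.injEq]
      and_intros <;> push_cast <;> try ring
  | case7 ch tl c p t a y n h7n h5 hna hny hnp hnt ih =>
      set r := (ch :: tl).drop 5 with hr
      have hcs : ch :: tl = ['\\','c','i','t','e'] ++ r := by
        conv_lhs => rw [← List.take_append_drop 5 (ch :: tl)]
        rw [h5, hr]
        rfl
      rw [loopA, if_neg h7n, if_pos h5, if_neg hna, if_neg hny, if_neg hnp, if_neg hnt, ih]
      rw [hcs]
      have h1 : cnt ['\\','c','i','t','e'] (['\\','c','i','t','e'] ++ r)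
          = cnt ['\\','c','i','t','e'] r + 1 := by
        rw [cnt_step_yes (by simp) (List.prefix_append _ _), List.drop_left]
      have h3 : cnt ['\\','c','i','t','e','a','u','t','h','o','r'] (['\\','c','i','t','e'] ++ r)
          = cnt ['\\','c','i','t','e','a','u','t','h','o','r'] r := by
        refine cnt_chunk rfl '\\' ['c','i','t','e'] r ?_ (by simp)
        intro h
        have h' : (['a','u','t','h','o','r'] : List Char) <+: r := by
          have := (List.prefix_append_right_inj (['\\','c','i','t','e'] : List Char)
            (l₁ := ['a','u','t','h','o','r']) (l₂ := r)).mp (by simpa using h)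
          exact this
        exact hna ((List.prefix_iff_eq_take.mp h').symm)
      have h4 : cnt ['\\','c','i','t','e','y','e','a','r'] (['\\','c','i','t','e'] ++ r)
          = cnt ['\\','c','i','t','e','y','e','a','r'] r := by
        refine cnt_chunk rfl '\\' ['c','i','t','e'] r ?_ (by simp)
        intro h
        have h' : (['y','e','a','r'] : List Char) <+: r := by
          have := (List.prefix_append_right_inj (['\\','c','i','t','e'] : List Char)
            (l₁ := ['y','e','a','r']) (l₂ := r)).mp (by simpa using h)
          exact this
        exact hny ((List.prefix_iff_eq_take.mp h').symm)
      have h5' : cnt ['\\','c','i','t','e','p'] (['\\','c','i','t','e'] ++ r)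
          = cnt ['\\','c','i','t','e','p'] r := by
        refine cnt_chunk rfl '\\' ['c','i','t','e'] r ?_ (by simp)
        intro h
        have h' : (['p'] : List Char) <+: r := by
          have := (List.prefix_append_right_inj (['\\','c','i','t','e'] : List Char)
            (l₁ := ['p']) (l₂ := r)).mp (by simpa using h)
          exact this
        exact hnp (by rw [pyGet_zero]; exact (single_prefix 'p' r).mp h')
      have h6 : cnt ['\\','c','i','t','e','t'] (['\\','c','i','t','e'] ++ r)
          = cnt ['\\','c','i','t','e','t'] r := by
        refine cnt_chunk rfl '\\' ['c','i','t','e'] r ?_ (by simp)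
        intro h
        have h' : (['t'] : List Char) <+: r := by
          have := (List.prefix_append_right_inj (['\\','c','i','t','e'] : List Char)
            (l₁ := ['t']) (l₂ := r)).mp (by simpa using h)
          exact this
        exact hnt (by rw [pyGet_zero]; exact (single_prefix 't' r).mp h')
      have h7 : cnt ['\\','n','o','c','i','t','e'] (['\\','c','i','t','e'] ++ r)
          = cnt ['\\','n','o','c','i','t','e'] r :=
        cnt_chunk rfl '\\' ['c','i','t','e'] r (by simp [List.cons_prefix_cons]) (by simp)
      rw [h1, h3, h4, h5', h6, h7]
      dsimp only
      simp only [Prod.mk.injEq]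
      and_intros <;> push_cast <;> try ring
  | case8 ch tl c p t a y n h7n h5n ih =>
      have n7 : ¬ (['\\','n','o','c','i','t','e'] : List Char) <+: ch :: tl := by
        intro h; exact h7n ((List.prefix_iff_eq_take.mp h).symm)
      have n5 : ¬ (['\\','c','i','t','e'] : List Char) <+: ch :: tl := by
        intro h; exact h5n ((List.prefix_iff_eq_take.mp h).symm)
      have nA : ¬ (['\\','c','i','t','e','a','u','t','h','o','r'] : List Char) <+: ch :: tl := by
        intro h
        exact n5 (List.IsPrefix.trans (by exact ⟨['a','u','t','h','o','r'], rfl⟩) h)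
      have nY : ¬ (['\\','c','i','t','e','y','e','a','r'] : List Char) <+: ch :: tl := by
        intro h
        exact n5 (List.IsPrefix.trans (by exact ⟨['y','e','a','r'], rfl⟩) h)
      have nP : ¬ (['\\','c','i','t','e','p'] : List Char) <+: ch :: tl := by
        intro h
        exact n5 (List.IsPrefix.trans (by exact ⟨['p'], rfl⟩) h)
      have nT : ¬ (['\\','c','i','t','e','t'] : List Char) <+: ch :: tl := by
        intro h
        exact n5 (List.IsPrefix.trans (by exact ⟨['t'], rfl⟩) h)
      rw [loopA, if_neg h7n, if_neg h5n, ih]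
      have e7 := cnt_step_not n7
      have e5 := cnt_step_not n5
      have eA := cnt_step_not nA
      have eY := cnt_step_not nY
      have eP := cnt_step_not nP
      have eT := cnt_step_not nT
      simp only [List.drop_succ_cons, List.drop_zero] at e7 e5 eA eY eP eT
      rw [e7, e5, eA, eY, eP, eT]

theorem analyze_citation_patterns_spec : Claim_equal_analyze_citation_patterns := by
  unfold Claim_equal_analyze_citation_patterns
  intro tex _
  unfold Spec_analyze_citation_patterns analyze_citation_patterns analyze_citation_patterns_alt
  rw [master]
  simp only [PySem.Str.count_eq,
    show "\\cite".toList = ['\\','c','i','t','e'] from rfl,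
    show "\\citeauthor".toList = ['\\','c','i','t','e','a','u','t','h','o','r'] from rfl,
    show "\\citeyear".toList = ['\\','c','i','t','e','y','e','a','r'] from rfl,
    show "\\citep".toList = ['\\','c','i','t','e','p'] from rfl,
    show "\\citet".toList = ['\\','c','i','t','e','t'] from rfl,
    show "\\nocite".toList = ['\\','n','o','c','i','t','e'] from rfl]
  rw [count_eq_cnt tex.toList ['\\','c','i','t','e'] (by simp),
    count_eq_cnt tex.toList ['\\','c','i','t','e','a','u','t','h','o','r'] (by simp),
    count_eq_cnt tex.toList ['\\','c','i','t','e','y','e','a','r'] (by simp),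
    count_eq_cnt tex.toList ['\\','c','i','t','e','p'] (by simp),
    count_eq_cnt tex.toList ['\\','c','i','t','e','t'] (by simp),
    count_eq_cnt tex.toList ['\\','n','o','c','i','t','e'] (by simp)]
  simp
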